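-- pv_equiv track=rewrite | github.com/yair-villca/-bdeet9yvillca | ejercicio.11.py | calcular_costo_telegrama
-- ===== SOURCE A (Python) =====
-- def calcular_costo_telegrama(mensaje):
--     costo = 0
--     for caracter in mensaje:
--         if 'a' <= caracter <= 'z' or 'A' <= caracter <= 'Z':
--             costo += 10
--         elif caracter.isdigit():
--             costo += 20
--         elif caracter != ' ':
--             costo += 30  # Consideramos las letras acentuadas y la ñ como caracteres especiales
--     return costo
-- ===== SOURCE B (Python) =====
-- def calcular_costo_telegrama(mensaje):
--     # Staged category counts + one arithmetic formula instead of a per-character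
--     # branch-and-accumulate loop; specials are derived as len - letters - digits - spaces.
--     letras = sum(1 for c in mensaje if 'a' <= c <= 'z' or 'A' <= c <= 'Z')
--     digitos = sum(1 for c in mensaje if c.isdigit())
--     espacios = sum(1 for c in mensaje if c == ' ')
--     return 10 * letras + 20 * digitos + 30 * (len(mensaje) - letras - digitos - espacios)
-- ===== Notes on version B (the rewrite author's own statement) =====
-- stated objective: alternative
-- what changed: B replaces A's single branch-and-accumulate loop by staged category counts (letters, digits, spaces) combined in one closed arithmetic formula, deriving the special-character count as len - letters - digits - spaces.
import Mathlib
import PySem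

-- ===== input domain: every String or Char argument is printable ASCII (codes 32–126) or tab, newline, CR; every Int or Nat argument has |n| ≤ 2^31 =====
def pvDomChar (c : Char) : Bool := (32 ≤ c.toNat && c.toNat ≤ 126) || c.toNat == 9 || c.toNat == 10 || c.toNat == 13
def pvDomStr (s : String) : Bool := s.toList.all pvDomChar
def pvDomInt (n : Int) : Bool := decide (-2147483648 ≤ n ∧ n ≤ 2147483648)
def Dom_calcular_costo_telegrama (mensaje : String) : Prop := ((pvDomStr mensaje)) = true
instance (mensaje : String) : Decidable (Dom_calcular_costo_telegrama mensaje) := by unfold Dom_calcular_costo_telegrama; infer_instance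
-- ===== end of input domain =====

-- B replaces A's branch-and-accumulate loop by staged category counts combined in one arithmetic formula (alternative decomposition, same cost).


-- ===== PORT A =====
-- literal transliteration of A: one pass, classifying each character and accumulating
def calcular_costo_telegrama (mensaje : String) : Int :=
  mensaje.toList.foldl
    (fun costo caracter =>
      if ('a' ≤ caracter ∧ caracter ≤ 'z') ∨ ('A' ≤ caracter ∧ caracter ≤ 'Z') then costo + 10
      else if PySem.Chars.isdigit caracter then costo + 20
      else if caracter ≠ ' ' then costo + 30
      else costo) 0

-- ===== PORT B =====
-- literal transliteration of B: count letters, digits and spaces, then one closed formula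
def calcular_costo_telegrama_alt (mensaje : String) : Int :=
  let letras : Int :=
    (mensaje.toList.countP (fun c => ('a' ≤ c && c ≤ 'z') || ('A' ≤ c && c ≤ 'Z')) : Nat)
  let digitos : Int := (mensaje.toList.countP PySem.Chars.isdigit : Nat)
  let espacios : Int := (mensaje.toList.countP (fun c => c == ' ') : Nat)
  10 * letras + 20 * digitos + 30 * ((mensaje.toList.length : Nat) - letras - digitos - espacios)

-- ===== PRECONDITION & SPEC =====
def Spec_calcular_costo_telegrama (mensaje : String) (out : Int) : Prop := out = calcular_costo_telegrama_alt mensaje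
instance (mensaje : String) (out : Int) : Decidable (Spec_calcular_costo_telegrama mensaje out) := by unfold Spec_calcular_costo_telegrama; infer_instance

-- ===== CLAIM (what is proved, stated in full; the proofs are below) =====
def Claim_equal_calcular_costo_telegrama : Prop := ∀ (mensaje : String), Dom_calcular_costo_telegrama mensaje → Spec_calcular_costo_telegrama mensaje (calcular_costo_telegrama mensaje)

-- ===== LEMMAS AND PROOFS =====

theorem pvLetter_not_digit (c : Char)
    (h : ('a' ≤ c ∧ c ≤ 'z') ∨ ('A' ≤ c ∧ c ≤ 'Z')) :
    PySem.Chars.isdigit c = false ∧ c ≠ ' ' := by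
  constructor
  · simp only [PySem.Chars.isdigit, Bool.and_eq_false_iff, decide_eq_false_iff_not]
    rcases h with ⟨h1, _⟩ | ⟨h1, _⟩
    · right; intro h9
      exact absurd (le_trans h1 h9) (by decide)
    · right; intro h9
      exact absurd (le_trans h1 h9) (by decide)
  · rintro rfl
    rcases h with ⟨h1, _⟩ | ⟨h1, _⟩ <;> exact absurd h1 (by decide)

theorem pvDigit_not_space (c : Char) (h : PySem.Chars.isdigit c = true) : c ≠ ' ' := by
  rintro rfl; exact absurd h (by decide)

-- loop invariant: A's fold from any accumulator equals the accumulator plus B's formula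
theorem pvFold_eq (l : List Char) : ∀ (c0 : Int),
    l.foldl
      (fun costo caracter =>
        if ('a' ≤ caracter ∧ caracter ≤ 'z') ∨ ('A' ≤ caracter ∧ caracter ≤ 'Z') then costo + 10
        else if PySem.Chars.isdigit caracter then costo + 20
        else if caracter ≠ ' ' then costo + 30
        else costo) c0
    = c0 + 10 * (l.countP (fun c => ('a' ≤ c && c ≤ 'z') || ('A' ≤ c && c ≤ 'Z')) : Int)
        + 20 * (l.countP PySem.Chars.isdigit : Int)
        + 30 * ((l.length : Int)
            - (l.countP (fun c => ('a' ≤ c && c ≤ 'z') || ('A' ≤ c && c ≤ 'Z')) : Nat)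
            - (l.countP PySem.Chars.isdigit : Nat)
            - (l.countP (fun c => c == ' ') : Nat)) := by
  induction l with
  | nil => intro c0; simp
  | cons c t ih =>
    intro c0
    simp only [List.foldl_cons, List.countP_cons, List.length_cons]
    rw [ih]
    by_cases hL : ('a' ≤ c ∧ c ≤ 'z') ∨ ('A' ≤ c ∧ c ≤ 'Z')
    · obtain ⟨hd, hs⟩ := pvLetter_not_digit c hL
      have hb : (('a' ≤ c && c ≤ 'z') || ('A' ≤ c && c ≤ 'Z')) = true := by
        rcases hL with ⟨h1, h2⟩ | ⟨h1, h2⟩ <;> simp [h1, h2]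
      have hsp : (c == ' ') = false := by simp [hs]
      simp only [if_pos hL, hb, hd, hsp]
      push_cast
      ring
    · have hb : (('a' ≤ c && c ≤ 'z') || ('A' ≤ c && c ≤ 'Z')) = false := by
        simp only [Bool.or_eq_false_iff, Bool.and_eq_false_iff, decide_eq_false_iff_not]
        rw [not_or, not_and_or, not_and_or] at hL
        exact hL
      by_cases hd : PySem.Chars.isdigit c = true
      · have hsp : (c == ' ') = false := by simp [pvDigit_not_space c hd]
        simp only [if_neg hL, if_pos hd, hb, hsp]
        push_cast
        ring
      · by_cases hsp : c = ' '
        · subst hsp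
          simp only [Bool.not_eq_true] at hd
          simp only [if_neg hL, hd, hb, if_neg (by simp : ¬(' ' ≠ ' ')), beq_self_eq_true]
          push_cast
          ring
        · have hsp' : (c == ' ') = false := by simp [hsp]
          simp only [Bool.not_eq_true] at hd
          simp only [if_neg hL, hd, hb, hsp', if_pos hsp]
          push_cast
          ring

-- ===== VERDICT (by name: the statement is the Claim_ definition above) =====
theorem calcular_costo_telegrama_spec : Claim_equal_calcular_costo_telegrama := by
  intro mensaje _
  show calcular_costo_telegrama mensaje = calcular_costo_telegrama_alt mensaje
  unfold calcular_costo_telegrama calcular_costo_telegrama_alt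
  rw [pvFold_eq]
  push_cast
  ring
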